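-- pv_equiv track=rewrite | github.com/SamuelVedrik/adventofcode2021 | day22.py | prune_components
-- ===== SOURCE A (Python) =====
-- def prune_components(comps):
--     new = []
--     for action, box in comps:
--         if action == "add":
--             if ("remove", box) in new:
--                 new.remove(("remove", box))
--             else:
--                 new.append(("add", box))
--         else:
--             if ("add", box) in new:
--                 new.remove(("add", box))
--             else:
--                 new.append(("remove", box))
--     return new
-- ===== SOURCE B (Python) =====
-- from collections import deque
--
--
-- def prune_components(comps):
--     # One pass: entries are kept with a live flag; a per-box FIFO queue of
--     # live indices plus the pending action lets a new entry cancel the oldest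
--     # opposite pending entry by index, with no scan of the result list.
--     entries = []          # [action, box, alive]
--     pend = {}             # box key -> (pending action, deque of live indices)
--     for action, box in comps:
--         a = "add" if action == "add" else "remove"
--         key = tuple(box)
--         q = pend.get(key)
--         if q is not None and q[1]:
--             act, idxs = q
--             if act != a:
--                 i = idxs.popleft()
--                 entries[i][2] = False
--             else:
--                 idxs.append(len(entries))
--                 entries.append([a, box, True])
--         else:
--             pend[key] = (a, deque([len(entries)]))
--             entries.append([a, box, True])
--     return [(e[0], e[1]) for e in entries if e[2]]
-- ===== Notes on version B (the rewrite author's own statement) =====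
-- stated objective: alternative
-- what changed: Replaces A's per-item membership test on the result list and list.remove scan with a single pass that keeps every appended entry with a live flag plus a per-box FIFO queue of live indices and the pending action, cancelling the oldest opposite entry by index and filtering the live entries at the end.
import Mathlib
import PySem

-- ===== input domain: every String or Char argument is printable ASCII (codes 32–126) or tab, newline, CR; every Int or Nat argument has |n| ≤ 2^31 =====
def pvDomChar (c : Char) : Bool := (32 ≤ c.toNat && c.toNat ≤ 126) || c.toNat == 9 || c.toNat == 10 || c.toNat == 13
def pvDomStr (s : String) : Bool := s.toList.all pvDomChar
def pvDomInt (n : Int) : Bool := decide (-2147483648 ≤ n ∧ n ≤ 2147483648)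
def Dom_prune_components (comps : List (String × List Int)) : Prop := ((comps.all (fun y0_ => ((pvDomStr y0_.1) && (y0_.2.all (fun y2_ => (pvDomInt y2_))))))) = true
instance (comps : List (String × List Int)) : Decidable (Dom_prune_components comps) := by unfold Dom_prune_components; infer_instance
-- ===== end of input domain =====

-- B cancels the oldest opposite pending entry via per-box index queues with a live flag (one pass) instead of A's membership test and remove on the result list; objective: alternative.

-- ===== PORT A =====
-- A's loop body, step for step: test membership of the opposing tuple, remove its first occurrence, else append.
def pvAStep (new : List (String × List Int)) (ab : String × List Int) : List (String × List Int) :=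
  if ab.1 == "add" then
    if ("remove", ab.2) ∈ new then (PySem.List.remove? new ("remove", ab.2)).getD new
    else new ++ [("add", ab.2)]
  else
    if ("add", ab.2) ∈ new then (PySem.List.remove? new ("add", ab.2)).getD new
    else new ++ [("remove", ab.2)]

def prune_components (comps : List (String × List Int)) : List (String × List Int) :=
  comps.foldl pvAStep []

-- ===== PORT B =====
-- B's loop body: entries carry a live flag; pend maps a box to its pending action and the FIFO queue of live indices.
def pvAltStep (st : List (String × List Int × Bool) × PySem.Dict (List Int) (String × List Nat))
    (ab : String × List Int) :
    List (String × List Int × Bool) × PySem.Dict (List Int) (String × List Nat) :=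
  let a : String := if ab.1 == "add" then "add" else "remove"
  let box := ab.2
  match st.2.get? box with
  | some (act, i :: is) =>
    if act ≠ a then (st.1.set i (act, box, false), st.2.insert box (act, is))
    else (st.1 ++ [(a, box, true)], st.2.insert box (act, (i :: is) ++ [st.1.length]))
  | _ => (st.1 ++ [(a, box, true)], st.2.insert box (a, [st.1.length]))

-- the final comprehension: keep the live entries, in order
def pvAlive (entries : List (String × List Int × Bool)) : List (String × List Int) :=
  entries.filterMap (fun e => if e.2.2 then some (e.1, e.2.1) else none)

def prune_components_alt (comps : List (String × List Int)) : List (String × List Int) :=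
  pvAlive ((comps.foldl pvAltStep ([], PySem.Dict.empty)).1)

-- ===== PRECONDITION & SPEC =====
def Spec_prune_components (comps : List (String × List Int)) (out : List (String × List Int)) : Prop := out = prune_components_alt comps
instance (comps : List (String × List Int)) (out : List (String × List Int)) : Decidable (Spec_prune_components comps out) := by unfold Spec_prune_components; infer_instance

-- ===== CLAIM (what is proved, stated in full; the proofs are below) =====
def Claim_equal_prune_components : Prop := ∀ (comps : List (String × List Int)), Dom_prune_components comps → Spec_prune_components comps (prune_components comps)

-- ===== LEMMAS AND PROOFS =====

-- indices of live entries whose box equals key, in increasing order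
def pvIdxs (entries : List (String × List Int × Bool)) (key : List Int) : List Nat :=
  (List.range entries.length).filter (fun i =>
    match entries[i]? with
    | some e => e.2.2 && e.2.1 == key
    | none => false)

-- loop invariant tying B's dict to the entries list
def pvInv (entries : List (String × List Int × Bool))
    (pend : PySem.Dict (List Int) (String × List Nat)) : Prop :=
  ∀ key : List Int,
    match pend.get? key with
    | none => pvIdxs entries key = []
    | some (act, idxs) =>
        idxs = pvIdxs entries key ∧ (act = "add" ∨ act = "remove") ∧
        ∀ i ∈ idxs, entries[i]? = some (act, key, true)

theorem pvIdxs_lt {entries : List (String × List Int × Bool)} {key : List Int} {i : Nat}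
    (h : i ∈ pvIdxs entries key) : i < entries.length := by
  unfold pvIdxs at h
  exact List.mem_range.mp (List.mem_filter.mp h).1

theorem pvIdxs_nodup (entries : List (String × List Int × Bool)) (key : List Int) :
    (pvIdxs entries key).Nodup :=
  List.Nodup.filter _ (List.nodup_range)

theorem mem_pvIdxs {entries : List (String × List Int × Bool)} {key : List Int} {i : Nat} :
    i ∈ pvIdxs entries key ↔ ∃ act, entries[i]? = some (act, key, true) := by
  unfold pvIdxs
  rw [List.mem_filter, List.mem_range]
  constructor
  · rintro ⟨hlt, hp⟩
    cases he : entries[i]? with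
    | none => rw [he] at hp; simp at hp
    | some e =>
      obtain ⟨a, b, al⟩ := e
      rw [he] at hp
      simp at hp
      exact ⟨a, by rw [hp.1, hp.2]⟩

  · rintro ⟨act, he⟩
    obtain ⟨hlt, -⟩ := List.getElem?_eq_some_iff.mp he
    refine ⟨hlt, ?_⟩
    rw [he]; simp

theorem mem_pvAlive {entries : List (String × List Int × Bool)} {p : String × List Int} :
    p ∈ pvAlive entries ↔ ∃ i : Nat, entries[i]? = some (p.1, p.2, true) := by
  unfold pvAlive
  rw [List.mem_filterMap]
  constructor
  · rintro ⟨e, hmem, he⟩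
    obtain ⟨a, b, al⟩ := e
    cases al with
    | false => simp at he
    | true =>
      simp at he
      obtain ⟨i, hi⟩ := List.mem_iff_getElem?.mp hmem
      exact ⟨i, by rw [hi, ← he]⟩
  · rintro ⟨i, hi⟩
    exact ⟨(p.1, p.2, true), List.mem_iff_getElem?.mpr ⟨i, hi⟩, rfl⟩

theorem pvAlive_append (l l' : List (String × List Int × Bool)) :
    pvAlive (l ++ l') = pvAlive l ++ pvAlive l' := by
  unfold pvAlive; exact List.filterMap_append

theorem pvAlive_cons (e : String × List Int × Bool) (l : List (String × List Int × Bool)) :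
    pvAlive (e :: l) = (if e.2.2 then [(e.1, e.2.1)] else []) ++ pvAlive l := by
  unfold pvAlive
  cases h : e.2.2 <;> simp [h]

theorem pvIdxs_append_one (entries : List (String × List Int × Bool))
    (e : String × List Int × Bool) (key : List Int) :
    pvIdxs (entries ++ [e]) key =
      pvIdxs entries key ++ (if e.2.2 && e.2.1 == key then [entries.length] else []) := by
  unfold pvIdxs
  have hlen : (entries ++ [e]).length = entries.length + 1 := by simp
  rw [hlen, List.range_succ, List.filter_append]
  congr 1
  · apply List.filter_congr
    intro j hj
    rw [List.getElem?_append_left (List.mem_range.mp hj)]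
  · rw [List.filter_cons, List.filter_nil, List.getElem?_concat_length]


theorem pvIdxs_set_false {entries : List (String × List Int × Bool)} {i : Nat}
    {act : String} {box : List Int} (hi : entries[i]? = some (act, box, true)) (key : List Int) :
    pvIdxs (entries.set i (act, box, false)) key =
      (pvIdxs entries key).filter (fun j => j ≠ i) := by
  unfold pvIdxs
  rw [List.filter_filter, List.length_set]
  apply List.filter_congr
  intro j hj
  rw [List.getElem?_set]
  by_cases hji : i = j
  · subst hji
    obtain ⟨hlt, -⟩ := List.getElem?_eq_some_iff.mp hi
    rw [if_pos rfl, if_pos hlt, hi]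
    simp
  · rw [if_neg hji]
    cases he : entries[j]? with
    | none => simp
    | some e => simp [Ne.symm hji]

theorem pvIdxs_cons (e : String × List Int × Bool) (rest : List (String × List Int × Bool))
    (key : List Int) :
    pvIdxs (e :: rest) key =
      (if e.2.2 && e.2.1 == key then [0] else []) ++ (pvIdxs rest key).map Nat.succ := by
  unfold pvIdxs
  rw [List.length_cons, List.range_succ_eq_map, List.filter_cons, List.filter_map]
  have hpred : ((fun i =>
      match (e :: rest)[i]? with
      | some e => e.2.2 && e.2.1 == key
      | none => false) ∘ Nat.succ) = (fun i =>
      match rest[i]? with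
      | some e => e.2.2 && e.2.1 == key
      | none => false) := by
    funext j
    simp [Function.comp]
  rw [hpred]
  simp only [List.getElem?_cons_zero]
  split <;> rfl

theorem pvRemove_alive {entries : List (String × List Int × Bool)} {act : String}
    {box : List Int} {i : Nat} {is : List Nat}
    (hidx : pvIdxs entries box = i :: is)
    (hall : ∀ j ∈ pvIdxs entries box, entries[j]? = some (act, box, true)) :
    PySem.List.remove? (pvAlive entries) (act, box) =
      some (pvAlive (entries.set i (act, box, false))) := by
  induction entries generalizing i is with
  | nil => simp [pvIdxs] at hidx
  | cons e rest ih =>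
    rw [pvIdxs_cons] at hidx
    have hall' : ∀ j ∈ pvIdxs rest box, rest[j]? = some (act, box, true) := by
      intro j hj
      have := hall (j + 1) (by
        rw [pvIdxs_cons]
        exact List.mem_append_right _ (List.mem_map.mpr ⟨j, hj, rfl⟩))
      simpa using this
    by_cases hp : (e.2.2 && e.2.1 == box) = true
    · rw [if_pos hp, List.singleton_append] at hidx
      obtain ⟨hi0, his⟩ : 0 = i ∧ (pvIdxs rest box).map Nat.succ = is := by
        exact ⟨(List.cons.injEq _ _ _ _ ▸ hidx).1, (List.cons.injEq _ _ _ _ ▸ hidx).2⟩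
      subst hi0
      have he : (e :: rest)[0]? = some (act, box, true) := hall 0 (by
        rw [pvIdxs_cons, if_pos hp]; simp)
      simp only [List.getElem?_cons_zero, Option.some.injEq] at he
      subst he
      rw [pvAlive_cons]
      simp only [List.set_cons_zero]
      rw [pvAlive_cons]
      simp [PySem.List.remove?_cons_self]
    · rw [if_neg hp, List.nil_append] at hidx
      cases hq : pvIdxs rest box with
      | nil => rw [hq] at hidx; simp at hidx
      | cons i' is' =>
        rw [hq] at hidx
        simp only [List.map_cons, List.cons.injEq] at hidx
        obtain ⟨hi, -⟩ := hidx
        subst hi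
        have hrec := ih hq (hq ▸ hall')
        cases hb : e.2.2 with
        | false =>
          rw [pvAlive_cons, List.set_cons_succ, pvAlive_cons]
          simp only [hb, if_neg Bool.false_ne_true, List.nil_append]
          exact hrec
        | true =>
          have hne : e.2.1 ≠ box := by
            intro hc
            exact hp (by rw [hb, hc]; simp)
          have hnepair : (e.1, e.2.1) ≠ (act, box) := by
            intro hc
            exact hne (congrArg Prod.snd hc)
          rw [pvAlive_cons, List.set_cons_succ, pvAlive_cons]
          simp only [hb, reduceIte, List.singleton_append]
          rw [PySem.List.remove?_cons_of_ne _ hnepair, hrec]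
          rfl

theorem pvNotMem {entries : List (String × List Int × Bool)} {box : List Int}
    {opp act : String} (hopp : act ≠ opp)
    (hall : ∀ j ∈ pvIdxs entries box, entries[j]? = some (act, box, true)) :
    (opp, box) ∉ pvAlive entries := by
  intro hmem
  obtain ⟨i, hi⟩ := mem_pvAlive.mp hmem
  have hmemI : i ∈ pvIdxs entries box := mem_pvIdxs.mpr ⟨opp, hi⟩
  have h2 := hall i hmemI
  rw [hi] at h2
  injection h2 with h3
  exact hopp (congrArg Prod.fst h3).symm

theorem pvInv_append (entries : List (String × List Int × Bool))
    (pend : PySem.Dict (List Int) (String × List Nat)) (a : String) (box : List Int)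
    (h : pvInv entries pend)
    (hall : ∀ j ∈ pvIdxs entries box, entries[j]? = some (a, box, true))
    (ha : a = "add" ∨ a = "remove") :
    pvInv (entries ++ [(a, box, true)])
      (pend.insert box (a, pvIdxs entries box ++ [entries.length])) := by
  intro key
  by_cases hkey : key = box
  · subst hkey
    rw [PySem.Dict.get?_insert_self]
    refine ⟨?_, ha, ?_⟩
    · rw [pvIdxs_append_one]
      simp
    · intro j hj
      rcases List.mem_append.mp hj with hj | hj
      · rw [List.getElem?_append_left (pvIdxs_lt hj)]
        exact hall j hj
      · rw [List.mem_singleton.mp hj, List.getElem?_concat_length]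
  · rw [PySem.Dict.get?_insert_of_ne _ _ hkey]
    have hsame : pvIdxs (entries ++ [(a, box, true)]) key = pvIdxs entries key := by
      rw [pvIdxs_append_one]
      have hbk : (((a, box, true) : String × List Int × Bool).2.2 &&
          ((a, box, true) : String × List Int × Bool).2.1 == key) = false := by
        simp only [Bool.true_and]
        exact beq_eq_false_iff_ne.mpr (fun hc => hkey hc.symm)
      rw [hbk]
      simp
    have hold := h key
    cases hg2 : pend.get? key with
    | none =>
      rw [hg2] at hold
      rw [hsame]
      exact hold
    | some v =>
      obtain ⟨act2, idxs2⟩ := v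
      rw [hg2] at hold
      refine ⟨hsame ▸ hold.1, hold.2.1, ?_⟩
      intro j hj
      rw [List.getElem?_append_left (pvIdxs_lt (hold.1 ▸ hj))]
      exact hold.2.2 j hj

theorem pvInv_cancel (entries : List (String × List Int × Bool))
    (pend : PySem.Dict (List Int) (String × List Nat)) (act : String) (box : List Int)
    (i : Nat) (is : List Nat)
    (h : pvInv entries pend)
    (hg : pend.get? box = some (act, i :: is)) :
    pvInv (entries.set i (act, box, false)) (pend.insert box (act, is)) := by
  have hbox := h box
  rw [hg] at hbox
  obtain ⟨hidx, hactm, hall⟩ := hbox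
  have hi_entry : entries[i]? = some (act, box, true) := hall i List.mem_cons_self
  have hnodup : (i :: is).Nodup := hidx ▸ pvIdxs_nodup entries box
  have hinotis : i ∉ is := (List.nodup_cons.mp hnodup).1
  intro key
  by_cases hkey : key = box
  · subst hkey
    rw [PySem.Dict.get?_insert_self]
    refine ⟨?_, hactm, ?_⟩
    · rw [pvIdxs_set_false hi_entry, ← hidx, List.filter_cons]
      simp only [decide_not, ne_eq, not_true_eq_false]
      symm
      apply List.filter_eq_self.mpr
      intro j hj
      simp only [Bool.not_eq_eq_eq_not, Bool.not_true, decide_eq_false_iff_not]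
      intro hc
      subst hc
      exact absurd hj hinotis
    · intro j hj
      have hji : j ≠ i := fun hc => hinotis (hc ▸ hj)
      rw [List.getElem?_set, if_neg (fun hc => hji hc.symm)]
      exact hall j (List.mem_cons_of_mem _ hj)
  · rw [PySem.Dict.get?_insert_of_ne _ _ hkey]
    have hinot : i ∉ pvIdxs entries key := by
      intro hc
      obtain ⟨act2, hact2⟩ := mem_pvIdxs.mp hc
      rw [hi_entry] at hact2
      injection hact2 with h1
      exact hkey (congrArg (fun p => p.2.1) h1).symm
    have hsame : pvIdxs (entries.set i (act, box, false)) key = pvIdxs entries key := by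
      rw [pvIdxs_set_false hi_entry]
      apply List.filter_eq_self.mpr
      intro j hj
      simp only [ne_eq, decide_not, Bool.not_eq_eq_eq_not, Bool.not_true, decide_eq_false_iff_not]
      intro hc
      subst hc
      exact absurd hj hinot
    have hold := h key
    cases hg2 : pend.get? key with
    | none =>
      rw [hg2] at hold
      rw [hsame]
      exact hold
    | some v =>
      obtain ⟨act2, idxs2⟩ := v
      rw [hg2] at hold
      refine ⟨hsame ▸ hold.1, hold.2.1, ?_⟩
      intro j hj
      have hji : j ≠ i := fun hc => hinot (hc ▸ hold.1 ▸ hj)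
      rw [List.getElem?_set, if_neg (fun hc => hji hc.symm)]
      exact hold.2.2 j hj

theorem pvCore (entries : List (String × List Int × Bool))
    (pend : PySem.Dict (List Int) (String × List Nat)) (a opp : String) (box : List Int)
    (ha : a = "add" ∨ a = "remove") (hactset : ∀ act : String, act = "add" ∨ act = "remove" → act ≠ a → act = opp)
    (hao : a ≠ opp)
    (h : pvInv entries pend) :
    (pvInv (match pend.get? box with
      | some (act, i :: is) =>
          if act ≠ a then (entries.set i (act, box, false), pend.insert box (act, is))
          else (entries ++ [(a, box, true)], pend.insert box (act, (i :: is) ++ [entries.length]))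
      | _ => (entries ++ [(a, box, true)], pend.insert box (a, [entries.length]))).1
      (match pend.get? box with
      | some (act, i :: is) =>
          if act ≠ a then (entries.set i (act, box, false), pend.insert box (act, is))
          else (entries ++ [(a, box, true)], pend.insert box (act, (i :: is) ++ [entries.length]))
      | _ => (entries ++ [(a, box, true)], pend.insert box (a, [entries.length]))).2) ∧
    (if (opp, box) ∈ pvAlive entries then
        (PySem.List.remove? (pvAlive entries) (opp, box)).getD (pvAlive entries)
      else pvAlive entries ++ [(a, box)]) =
      pvAlive (match pend.get? box with
      | some (act, i :: is) =>
          if act ≠ a then (entries.set i (act, box, false), pend.insert box (act, is))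
          else (entries ++ [(a, box, true)], pend.insert box (act, (i :: is) ++ [entries.length]))
      | _ => (entries ++ [(a, box, true)], pend.insert box (a, [entries.length]))).1 := by
  have happnd : ∀ (hemp : ∀ j ∈ pvIdxs entries box, entries[j]? = some (a, box, true)),
      pvAlive entries ++ [(a, box)] = pvAlive (entries ++ [(a, box, true)]) := by
    intro _
    rw [pvAlive_append, pvAlive_cons]
    rfl
  cases hg : pend.get? box with
  | none =>
    have hbox := h box
    rw [hg] at hbox
    have hallnil : ∀ j ∈ pvIdxs entries box, entries[j]? = some (a, box, true) := by
      rw [hbox]; intro j hj; simp at hj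
    have hnm := pvNotMem hao hallnil
    refine ⟨?_, ?_⟩
    · have := pvInv_append entries pend a box h hallnil ha
      rw [hbox] at this
      exact this
    · rw [if_neg hnm]
      exact happnd hallnil
  | some v =>
    obtain ⟨act, idxs⟩ := v
    have hbox := h box
    rw [hg] at hbox
    obtain ⟨hidx, hactm, hall⟩ := hbox
    cases idxs with
    | nil =>
      have hallnil : ∀ j ∈ pvIdxs entries box, entries[j]? = some (a, box, true) := by
        rw [← hidx]; intro j hj; simp at hj
      have hnm := pvNotMem hao hallnil
      refine ⟨?_, ?_⟩
      · have := pvInv_append entries pend a box h hallnil ha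
        rw [← hidx] at this
        exact this
      · rw [if_neg hnm]
        exact happnd hallnil
    | cons i is =>
      have halls : ∀ j ∈ pvIdxs entries box, entries[j]? = some (act, box, true) := by
        rw [← hidx]; exact hall
      by_cases hact : act = a
      · subst hact
        simp only [ne_eq, not_true_eq_false, reduceIte]
        refine ⟨?_, ?_⟩
        · have hinv2 := pvInv_append entries pend act box h halls ha
          rw [← hidx] at hinv2
          exact hinv2
        · rw [if_neg (pvNotMem hao halls)]
          rw [pvAlive_append, pvAlive_cons]
          rfl
      · simp only [ne_eq, hact, not_false_eq_true, reduceIte]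
        have hopp2 : act = opp := hactset act hactm hact
        have hi_entry : entries[i]? = some (act, box, true) := hall i List.mem_cons_self
        have hmem : (opp, box) ∈ pvAlive entries := mem_pvAlive.mpr ⟨i, by
          rw [hi_entry, hopp2]⟩
        refine ⟨pvInv_cancel entries pend act box i is h hg, ?_⟩
        rw [if_pos hmem]
        have hrem := pvRemove_alive hidx.symm halls
        rw [← hopp2, hrem]
        rfl


theorem pvStep_ok (entries : List (String × List Int × Bool))
    (pend : PySem.Dict (List Int) (String × List Nat)) (ab : String × List Int)
    (h : pvInv entries pend) :
    pvInv (pvAltStep (entries, pend) ab).1 (pvAltStep (entries, pend) ab).2 ∧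
      pvAStep (pvAlive entries) ab = pvAlive (pvAltStep (entries, pend) ab).1 := by
  by_cases hab : (ab.1 == "add") = true
  · have hc := pvCore entries pend "add" "remove" ab.2 (Or.inl rfl)
      (fun act hm hne => hm.resolve_left hne) (by decide) h
    simp only [pvAStep, pvAltStep, hab, if_true]
    exact hc
  · rw [Bool.not_eq_true] at hab
    have hc := pvCore entries pend "remove" "add" ab.2 (Or.inr rfl)
      (fun act hm hne => hm.resolve_right hne) (by decide) h
    simp only [pvAStep, pvAltStep, hab, Bool.false_eq_true, if_false]
    exact hc

theorem pvFold_ok (comps : List (String × List Int))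
    (entries : List (String × List Int × Bool))
    (pend : PySem.Dict (List Int) (String × List Nat)) (h : pvInv entries pend) :
    comps.foldl pvAStep (pvAlive entries) = pvAlive ((comps.foldl pvAltStep (entries, pend)).1) := by
  induction comps generalizing entries pend with
  | nil => rfl
  | cons ab rest ih =>
    have hs := pvStep_ok entries pend ab h
    simp only [List.foldl_cons, hs.2]
    have := ih (pvAltStep (entries, pend) ab).1 (pvAltStep (entries, pend) ab).2 hs.1
    simpa using this

-- ===== VERDICT (by name: the statement is the Claim_ definition above) =====
theorem prune_components_spec : Claim_equal_prune_components := by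
  intro comps _
  show prune_components comps = prune_components_alt comps
  have hinv : pvInv [] PySem.Dict.empty := by
    intro key
    simp [PySem.Dict.get?_empty, pvIdxs]
  simpa [prune_components, prune_components_alt, pvAlive] using
    pvFold_ok comps [] PySem.Dict.empty hinv
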